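-- pv_equiv track=rewrite | github.com/samvel-melikyan/lesones | HW/HW_functions.py | combin_data
-- ===== SOURCE A (Python) =====
-- def combin_data(list):
--     producs = {}
--     for item in list:
--         product_name, quantity, price = item
--         if product_name in producs.keys():
--             producs[product_name]["quantity"] += quantity
--             producs[product_name]["price"] += price
--             producs[product_name]["total_price"] += quantity * price
--         else:
--             producs[product_name] = {"quantity": quantity,
--                                      "price": price,
--                                      "total_price": quantity * price}
--     return producs
-- ===== SOURCE B (Python) =====
-- def combin_data(list):
--     groups = {}
--     for product_name, quantity, price in list:
--         groups.setdefault(product_name, []).append((quantity, price))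
--     producs = {}
--     for name, items in groups.items():
--         producs[name] = {
--             "quantity": sum(q for q, _ in items),
--             "price": sum(p for _, p in items),
--             "total_price": sum(q * p for q, p in items),
--         }
--     return producs
-- ===== Notes on version B (the rewrite author's own statement) =====
-- stated objective: alternative
-- what changed: A aggregates in a single fold that mutates per-key running sums inside nested dicts; B first groups the items by product name into an order-preserving dict of (quantity, price) lists, then a second pass computes the three sums per group.
import Mathlib
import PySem

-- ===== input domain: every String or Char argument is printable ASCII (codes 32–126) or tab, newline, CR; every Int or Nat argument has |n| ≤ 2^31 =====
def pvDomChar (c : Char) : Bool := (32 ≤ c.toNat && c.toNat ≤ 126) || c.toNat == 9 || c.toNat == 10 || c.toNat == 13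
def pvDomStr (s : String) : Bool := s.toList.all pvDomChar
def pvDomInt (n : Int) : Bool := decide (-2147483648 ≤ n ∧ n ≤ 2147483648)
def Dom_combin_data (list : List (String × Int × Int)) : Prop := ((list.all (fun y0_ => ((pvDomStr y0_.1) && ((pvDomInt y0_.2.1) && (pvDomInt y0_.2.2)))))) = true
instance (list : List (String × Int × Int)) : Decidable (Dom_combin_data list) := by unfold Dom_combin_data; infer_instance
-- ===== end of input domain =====

-- B groups the items by product name first and then computes the three per-group sums in a
-- second pass, instead of A's single fold that updates running sums inside nested dicts
-- (alternative decomposition, same cost).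

-- ===== PORT A =====
def combin_data (list : List (String × Int × Int)) : List (String × List (String × Int)) :=
  ((list.foldl (fun producs item =>
      let product_name := item.1
      let quantity := item.2.1
      let price := item.2.2
      if producs.contains product_name then
        producs.modify product_name PySem.Dict.empty (fun d =>
          ((d.modify "quantity" 0 (· + quantity)).modify "price" 0 (· + price)).modify
            "total_price" 0 (· + quantity * price))
      else
        producs.insert product_name (PySem.Dict.mk
          [("quantity", quantity), ("price", price), ("total_price", quantity * price)]))
    PySem.Dict.empty).items).map (fun p => (p.1, p.2.items))

-- ===== PORT B =====
def combin_data_alt (list : List (String × Int × Int)) : List (String × List (String × Int)) :=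
  let groups : PySem.Dict String (List (Int × Int)) :=
    list.foldl (fun g item => g.modify item.1 [] (· ++ [(item.2.1, item.2.2)])) PySem.Dict.empty
  (groups.items.foldl (fun producs p =>
      producs.insert p.1
        [("quantity", (p.2.map (·.1)).sum),
         ("price", (p.2.map (·.2)).sum),
         ("total_price", (p.2.map (fun qp => qp.1 * qp.2)).sum)])
    PySem.Dict.empty).items

-- ===== PRECONDITION & SPEC =====
def Spec_combin_data (list : List (String × Int × Int)) (out : List (String × List (String × Int))) : Prop := out = combin_data_alt list
instance (list : List (String × Int × Int)) (out : List (String × List (String × Int))) : Decidable (Spec_combin_data list out) := by unfold Spec_combin_data; infer_instance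

-- ===== CLAIM (what is proved, stated in full; the proofs are below) =====
def Claim_equal_combin_data : Prop := ∀ (list : List (String × Int × Int)), Dom_combin_data list → Spec_combin_data list (combin_data list)

-- ===== LEMMAS AND PROOFS =====

def pvAgg (l : List (Int × Int)) : List (String × Int) :=
  [("quantity", (l.map (·.1)).sum),
   ("price", (l.map (·.2)).sum),
   ("total_price", (l.map (fun qp => qp.1 * qp.2)).sum)]

def pvStepA (producs : PySem.Dict String (PySem.Dict String Int)) (item : String × Int × Int) :
    PySem.Dict String (PySem.Dict String Int) :=
  if producs.contains item.1 then
    producs.modify item.1 PySem.Dict.empty (fun d =>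
      ((d.modify "quantity" 0 (· + item.2.1)).modify "price" 0 (· + item.2.2)).modify
        "total_price" 0 (· + item.2.1 * item.2.2))
  else
    producs.insert item.1 (PySem.Dict.mk
      [("quantity", item.2.1), ("price", item.2.2), ("total_price", item.2.1 * item.2.2)])

def pvStepG (g : PySem.Dict String (List (Int × Int))) (item : String × Int × Int) :
    PySem.Dict String (List (Int × Int)) :=
  g.modify item.1 [] (· ++ [(item.2.1, item.2.2)])

def pvF (p : String × List (Int × Int)) : String × PySem.Dict String Int :=
  (p.1, PySem.Dict.mk (pvAgg p.2))

lemma get?_mk_map {β γ : Type} (l : List (String × β)) (h : β → γ) (k : String) :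
    (PySem.Dict.mk (l.map (fun p => (p.1, h p.2)))).get? k
      = ((PySem.Dict.mk l).get? k).map h := by
  induction l with
  | nil => rfl
  | cons a t ih =>
      obtain ⟨a1, a2⟩ := a
      by_cases hk : a1 = k <;> simp [PySem.Dict.get?_mk_cons, hk, ih]

lemma get?_mk_pvF (l : List (String × List (Int × Int))) (k : String) :
    (PySem.Dict.mk (l.map pvF)).get? k
      = ((PySem.Dict.mk l).get? k).map (fun v => PySem.Dict.mk (pvAgg v)) :=
  get?_mk_map l (fun v => PySem.Dict.mk (pvAgg v)) k

lemma agg_step (v : List (Int × Int)) (q p : Int) :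
    (((PySem.Dict.mk (pvAgg v)).modify "quantity" 0 (· + q)).modify "price" 0 (· + p)).modify
        "total_price" 0 (· + q * p) = PySem.Dict.mk (pvAgg (v ++ [(q, p)])) := by
  simp [pvAgg, PySem.Dict.modify, PySem.Dict.insert, PySem.Dict.getD, PySem.Dict.get?,
    PySem.Dict.contains, List.find?]

lemma step_comm (g : PySem.Dict String (List (Int × Int))) (x : String × Int × Int) :
    pvStepA (PySem.Dict.mk (g.items.map pvF)) x
      = PySem.Dict.mk ((pvStepG g x).items.map pvF) := by
  obtain ⟨name, q, p⟩ := x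
  have hcont : (PySem.Dict.mk (g.items.map pvF)).contains name = g.contains name := by
    rw [PySem.Dict.contains_eq_isSome_get?, PySem.Dict.contains_eq_isSome_get?,
      get?_mk_pvF]
    cases (PySem.Dict.mk g.items).get? name <;> rfl
  cases hc : g.contains name with
  | true =>
      obtain ⟨v0, hv0⟩ : ∃ v0, g.get? name = some v0 := by
        have := (PySem.Dict.contains_eq_isSome_get? g name).symm.trans hc
        exact Option.isSome_iff_exists.mp this
      have hgetD : (PySem.Dict.mk (g.items.map pvF)).getD name PySem.Dict.empty
          = PySem.Dict.mk (pvAgg v0) := by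
        rw [PySem.Dict.getD, get?_mk_pvF]
        show (Option.map _ (g.get? name)).getD _ = _
        rw [hv0]; rfl
      have hgetDG : g.getD name [] = v0 := by rw [PySem.Dict.getD, hv0]; rfl
      have hcontM : (PySem.Dict.mk (g.items.map pvF)).contains name = true := hcont.trans hc
      have hA : pvStepA (PySem.Dict.mk (g.items.map pvF)) ⟨name, q, p⟩
          = (PySem.Dict.mk (g.items.map pvF)).insert name
              (PySem.Dict.mk (pvAgg (v0 ++ [(q, p)]))) := by
        simp only [pvStepA, hcontM, if_true]
        calc (PySem.Dict.mk (g.items.map pvF)).modify name PySem.Dict.empty _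
            = (PySem.Dict.mk (g.items.map pvF)).insert name
                ((fun d => ((d.modify "quantity" 0 (· + q)).modify "price" 0 (· + p)).modify
                  "total_price" 0 (· + q * p))
                  ((PySem.Dict.mk (g.items.map pvF)).getD name PySem.Dict.empty)) := rfl
          _ = _ := by rw [hgetD]; exact congrArg _ (agg_step v0 q p)
      have hstepG : pvStepG g ⟨name, q, p⟩ = g.insert name (v0 ++ [(q, p)]) := by
        simp [pvStepG, PySem.Dict.modify, hgetDG]
      apply PySem.Dict.ext
      rw [hA, PySem.Dict.items_insert_of_contains _ _ hcontM,
        show (PySem.Dict.mk ((pvStepG g ⟨name, q, p⟩).items.map pvF)).items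
            = (pvStepG g ⟨name, q, p⟩).items.map pvF from rfl, hstepG,
        PySem.Dict.items_insert_of_contains _ _ hc]
      rw [List.map_map, List.map_map]
      apply List.map_congr_left
      intro r _
      by_cases hr : r.1 = name <;> simp [pvF, hr]
  | false =>
      have hcontM : (PySem.Dict.mk (g.items.map pvF)).contains name = false := hcont.trans hc
      have hA : pvStepA (PySem.Dict.mk (g.items.map pvF)) ⟨name, q, p⟩
          = (PySem.Dict.mk (g.items.map pvF)).insert name
              (PySem.Dict.mk [("quantity", q), ("price", p), ("total_price", q * p)]) := by
        simp [pvStepA, hcontM]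
      have hstepG : pvStepG g ⟨name, q, p⟩ = g.insert name [(q, p)] := by
        simp [pvStepG, PySem.Dict.modify, PySem.Dict.getD_of_not_contains _ _ hc]
      apply PySem.Dict.ext
      rw [hA, PySem.Dict.items_insert_of_not_contains _ _ hcontM,
        show (PySem.Dict.mk ((pvStepG g ⟨name, q, p⟩).items.map pvF)).items
            = (pvStepG g ⟨name, q, p⟩).items.map pvF from rfl, hstepG,
        PySem.Dict.items_insert_of_not_contains _ _ hc]
      simp [pvF, pvAgg]

theorem pvInv : ∀ (xs : List (String × Int × Int)) (g : PySem.Dict String (List (Int × Int))),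
    (xs.foldl pvStepA (PySem.Dict.mk (g.items.map pvF))).items
      = (xs.foldl pvStepG g).items.map pvF := by
  intro xs
  induction xs with
  | nil => intro g; rfl
  | cons x t ih =>
      intro g
      rw [List.foldl_cons, List.foldl_cons, step_comm]
      exact ih (pvStepG g x)

theorem pvMain (list : List (String × Int × Int)) :
    combin_data list = combin_data_alt list := by
  have hA : combin_data list
      = ((list.foldl pvStepA PySem.Dict.empty).items).map (fun p => (p.1, p.2.items)) := rfl
  have hG : combin_data_alt list
      = ((list.foldl pvStepG PySem.Dict.empty).items.foldl
          (fun producs p => producs.insert p.1 (pvAgg p.2)) PySem.Dict.empty).items := rfl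
  have hnodup : (list.foldl pvStepG PySem.Dict.empty).keys.Nodup :=
    PySem.Dict.nodup_keys_foldl_modify_key list (fun x => x.1) []
      (fun _ x => (· ++ [(x.2.1, x.2.2)])) PySem.Dict.empty PySem.Dict.nodup_keys_empty
  have hnodup' : ((list.foldl pvStepG PySem.Dict.empty).items.map
      (fun p : String × List (Int × Int) => p.1)).Nodup := hnodup
  have hfresh : ((list.foldl pvStepG PySem.Dict.empty).items.foldl
        (fun producs p => producs.insert p.1 (pvAgg p.2)) PySem.Dict.empty).items
      = PySem.Dict.empty.items
        ++ (list.foldl pvStepG PySem.Dict.empty).items.map (fun p => (p.1, pvAgg p.2)) :=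
    PySem.Dict.items_foldl_insert_fresh (list.foldl pvStepG PySem.Dict.empty).items
      (fun p : String × List (Int × Int) => p.1)
      (fun p : String × List (Int × Int) => pvAgg p.2) PySem.Dict.empty
      (fun a _ => PySem.Dict.contains_empty a.1) hnodup'
  have hinv : (List.foldl pvStepA PySem.Dict.empty list).items
      = List.map pvF (List.foldl pvStepG PySem.Dict.empty list).items :=
    pvInv list PySem.Dict.empty
  rw [hA, hG, hfresh, hinv, List.map_map]
  rfl


-- ===== VERDICT (by name: the statement is the Claim_ definition above) =====
theorem combin_data_spec : Claim_equal_combin_data := by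
  intro list _
  show combin_data list = combin_data_alt list
  exact pvMain list
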